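-- pv_equiv track=rewrite | github.com/amol-ship-it/agi-core | domains/arc/primitives.py | fill_row_from_right
-- ===== SOURCE A (Python) =====
-- Grid = list[list[int]]
--
-- def fill_row_from_right(grid: Grid) -> Grid:
--     """Propagate non-zero values rightward in each row."""
--     if not grid or not grid[0]:
--         return grid
--     result = [row[:] for row in grid]
--     for r in range(len(result)):
--         last = 0
--         for c in range(len(result[r])):
--             if result[r][c] != 0:
--                 last = result[r][c]
--             elif last != 0:
--                 result[r][c] = last
--     return result
-- ===== SOURCE B (Python) =====
-- def _last_nonzero_upto(row, c):
--     for j in range(c, -1, -1):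
--         if row[j] != 0:
--             return row[j]
--     return 0
--
-- def fill_row_from_right(grid):
--     """Propagate non-zero values rightward in each row."""
--     if not grid or not grid[0]:
--         return grid
--     return [[_last_nonzero_upto(row, c) for c in range(len(row))] for row in grid]
-- ===== Notes on version B (the rewrite author's own statement) =====
-- stated objective: alternative
-- what changed: Instead of a single left-to-right pass threading a `last` accumulator, B computes each output cell independently as the nearest non-zero value at or before its column, via a per-cell backward search; no carried state, different traversal, at the cost of quadratic work per row.
import Mathlib
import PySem

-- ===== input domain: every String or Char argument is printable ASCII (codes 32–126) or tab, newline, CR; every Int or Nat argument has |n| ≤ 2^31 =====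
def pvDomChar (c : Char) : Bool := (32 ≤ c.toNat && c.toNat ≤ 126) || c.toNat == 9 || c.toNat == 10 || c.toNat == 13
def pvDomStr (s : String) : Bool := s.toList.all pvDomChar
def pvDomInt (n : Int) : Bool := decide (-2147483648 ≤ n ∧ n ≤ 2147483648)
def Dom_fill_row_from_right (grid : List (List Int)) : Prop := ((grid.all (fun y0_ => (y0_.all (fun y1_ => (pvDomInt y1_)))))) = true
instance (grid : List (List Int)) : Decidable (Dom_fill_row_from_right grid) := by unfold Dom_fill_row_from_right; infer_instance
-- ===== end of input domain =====

-- B replaces A's stateful left-to-right pass (manual `last` accumulator) by computing each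
-- cell independently as the nearest non-zero value at or before its column (alternative; same result).

-- ===== PORT A =====
-- inner loop of A: walks the row left to right carrying `last`, writing `last`
-- into zero cells once a non-zero value has been seen
def pvFillRowA (last : Int) : List Int → List Int
  | [] => []
  | x :: xs =>
    if x ≠ 0 then x :: pvFillRowA x xs
    else if last ≠ 0 then last :: pvFillRowA last xs
    else x :: pvFillRowA last xs

def fill_row_from_right (grid : List (List Int)) : List (List Int) :=
  if grid = [] ∨ grid.headD [] = [] then grid
  else grid.map (fun row => pvFillRowA 0 row)

-- ===== PORT B =====
-- Source B's _last_nonzero_upto: loop j = c, c-1, …, 0; return row[j] on the first non-zero; else 0.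
-- (indices are always in range, so getD is exact for row[j])
def pvLastNonzeroUpto (row : List Int) : Nat → Int
  | 0 => if row.getD 0 0 ≠ 0 then row.getD 0 0 else 0
  | c + 1 => if row.getD (c + 1) 0 ≠ 0 then row.getD (c + 1) 0 else pvLastNonzeroUpto row c

def fill_row_from_right_alt (grid : List (List Int)) : List (List Int) :=
  if grid = [] ∨ grid.headD [] = [] then grid
  else grid.map (fun row => (List.range row.length).map (fun c => pvLastNonzeroUpto row c))

-- ===== PRECONDITION & SPEC =====
def Spec_fill_row_from_right (grid : List (List Int)) (out : List (List Int)) : Prop := out = fill_row_from_right_alt grid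
instance (grid : List (List Int)) (out : List (List Int)) : Decidable (Spec_fill_row_from_right grid out) := by unfold Spec_fill_row_from_right; infer_instance

-- ===== CLAIM (what is proved, stated in full; the proofs are below) =====
def Claim_equal_fill_row_from_right : Prop := ∀ (grid : List (List Int)), Dom_fill_row_from_right grid → Spec_fill_row_from_right grid (fill_row_from_right grid)

-- ===== LEMMAS AND PROOFS =====

-- generalisation of pvLastNonzeroUpto with an arbitrary default value
def pvSearchD (d : Int) (row : List Int) : Nat → Int
  | 0 => if row.getD 0 0 ≠ 0 then row.getD 0 0 else d
  | c + 1 => if row.getD (c + 1) 0 ≠ 0 then row.getD (c + 1) 0 else pvSearchD d row c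

theorem pvLastNonzeroUpto_eq_searchD (row : List Int) (c : Nat) :
    pvLastNonzeroUpto row c = pvSearchD 0 row c := by
  induction c with
  | zero => rfl
  | succ c ih => simp [pvLastNonzeroUpto, pvSearchD, ih]

theorem pvSearchD_cons (d x : Int) (xs : List Int) (c : Nat) :
    pvSearchD d (x :: xs) (c + 1) = pvSearchD (if x ≠ 0 then x else d) xs c := by
  induction c with
  | zero =>
    simp only [pvSearchD, List.getD_cons_succ, List.getD_cons_zero]
  | succ c ih =>
    simp only [pvSearchD, List.getD_cons_succ] at *
    rw [ih]

theorem pvFillRowA_eq_searchD (xs : List Int) (d : Int) :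
    pvFillRowA d xs = (List.range xs.length).map (pvSearchD d xs) := by
  induction xs generalizing d with
  | nil => rfl
  | cons x xs ih =>
    have htail : ((List.range xs.length).map Nat.succ).map (pvSearchD d (x :: xs))
        = (List.range xs.length).map (pvSearchD (if x ≠ 0 then x else d) xs) := by
      rw [List.map_map]
      exact List.map_congr_left (fun c _ => pvSearchD_cons d x xs c)
    have hhead : pvSearchD d (x :: xs) 0 = if x ≠ 0 then x else d := by
      simp only [pvSearchD, List.getD_cons_zero]
    rw [List.length_cons, List.range_succ_eq_map, List.map_cons, htail, ← ih, hhead]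
    by_cases hx : x = 0
    · subst hx
      by_cases hd : d = 0 <;> simp [pvFillRowA, hd]
    · simp [pvFillRowA, hx]

-- ===== VERDICT (by name: the statement is the Claim_ definition above) =====
theorem fill_row_from_right_spec : Claim_equal_fill_row_from_right := by
  intro grid _
  unfold Spec_fill_row_from_right fill_row_from_right fill_row_from_right_alt
  split
  · rfl
  · refine List.map_congr_left (fun row _ => ?_)
    rw [pvFillRowA_eq_searchD]
    exact (List.map_congr_left (fun c _ => (pvLastNonzeroUpto_eq_searchD row c))).symm
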